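-- pv_equiv track=rewrite | github.com/MatheusHenrique805/DOT-DOCS | Lista 2/Questão 13.py | contar_ocorenface
-- ===== SOURCE A (Python) =====
-- def contar_ocorenface(results,l):
--     face1 = face2 = face3 = face4 = face5 = face6 = 0
--     ocorre = f''
--     for resultado in results:
--         if resultado == 1:
--             face1 += 1
--         elif resultado == 2:
--             face2 += 1
--         elif resultado == 3:
--             face3 += 1
--         elif resultado == 4:
--             face4 += 1
--         elif resultado == 5:
--             face5 += 1
--         else:
--             face6 += 1
--
--     ocorre = f'face 1:{face1}/{l}\nface 2:{face2}/{l}\nface 3:{face3}/{l}\nface 4:{face4}/{l}\nface 5:{face5}/{l}\nface 6:{face6}/{l}'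
--
--     return ocorre
-- ===== SOURCE B (Python) =====
-- def contar_ocorenface(results, l):
--     counts = [results.count(i) for i in range(1, 6)]
--     counts.append(len(results) - sum(counts))
--     return '\n'.join(f'face {i}:{n}/{l}' for i, n in enumerate(counts, 1))
-- ===== Notes on version B (the rewrite author's own statement) =====
-- stated objective: simpler
-- what changed: Replaces A's single accumulator pass over six named counters and its hand-written six-line f-string with five staged results.count(i) scans, face 6 derived by subtraction from len(results), and a '\n'.join over enumerate for the formatting.
import Mathlib
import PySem

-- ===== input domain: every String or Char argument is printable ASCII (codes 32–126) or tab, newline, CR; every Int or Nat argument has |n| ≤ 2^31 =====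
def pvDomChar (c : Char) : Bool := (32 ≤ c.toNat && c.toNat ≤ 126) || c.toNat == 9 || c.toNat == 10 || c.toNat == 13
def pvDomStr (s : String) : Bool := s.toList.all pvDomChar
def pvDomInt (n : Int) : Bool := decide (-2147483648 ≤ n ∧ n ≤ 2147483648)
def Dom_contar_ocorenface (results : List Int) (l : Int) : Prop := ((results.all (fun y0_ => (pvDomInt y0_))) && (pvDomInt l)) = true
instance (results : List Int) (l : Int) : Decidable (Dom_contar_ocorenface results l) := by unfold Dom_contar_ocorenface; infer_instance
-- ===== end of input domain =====

-- B replaces A's one-pass six-counter accumulator and hand-written six-line f-string with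
-- five staged results.count(i) scans, face 6 by subtraction, and a '\n'.join over enumerate.

-- ===== PORT A =====
def contar_ocorenface (results : List Int) (l : Int) : String :=
  let s := results.foldl
    (fun (st : Int × Int × Int × Int × Int × Int) (resultado : Int) =>
      let (f1, f2, f3, f4, f5, f6) := st
      if resultado = 1 then (f1 + 1, f2, f3, f4, f5, f6)
      else if resultado = 2 then (f1, f2 + 1, f3, f4, f5, f6)
      else if resultado = 3 then (f1, f2, f3 + 1, f4, f5, f6)
      else if resultado = 4 then (f1, f2, f3, f4 + 1, f5, f6)
      else if resultado = 5 then (f1, f2, f3, f4, f5 + 1, f6)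
      else (f1, f2, f3, f4, f5, f6 + 1))
    (0, 0, 0, 0, 0, 0)
  "face 1:" ++ PySem.Int.toStr s.1 ++ "/" ++ PySem.Int.toStr l ++
  "\nface 2:" ++ PySem.Int.toStr s.2.1 ++ "/" ++ PySem.Int.toStr l ++
  "\nface 3:" ++ PySem.Int.toStr s.2.2.1 ++ "/" ++ PySem.Int.toStr l ++
  "\nface 4:" ++ PySem.Int.toStr s.2.2.2.1 ++ "/" ++ PySem.Int.toStr l ++
  "\nface 5:" ++ PySem.Int.toStr s.2.2.2.2.1 ++ "/" ++ PySem.Int.toStr l ++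
  "\nface 6:" ++ PySem.Int.toStr s.2.2.2.2.2 ++ "/" ++ PySem.Int.toStr l

-- ===== PORT B =====
def contar_ocorenface_alt (results : List Int) (l : Int) : String :=
  let counts := (PySem.List.pyRange 1 6 1).map (fun i => (PySem.List.count results i : Int))
  let counts := counts ++ [(results.length : Int) - counts.sum]
  PySem.Str.join "\n"
    ((PySem.List.enumerate counts 1).map
      (fun p => "face " ++ PySem.Int.toStr p.1 ++ ":" ++ PySem.Int.toStr p.2 ++ "/" ++ PySem.Int.toStr l))

-- ===== PRECONDITION & SPEC =====
def Spec_contar_ocorenface (results : List Int) (l : Int) (out : String) : Prop := out = contar_ocorenface_alt results l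
instance (results : List Int) (l : Int) (out : String) : Decidable (Spec_contar_ocorenface results l out) := by unfold Spec_contar_ocorenface; infer_instance

-- ===== CLAIM =====
def Claim_equal_contar_ocorenface : Prop := ∀ (results : List Int) (l : Int), Dom_contar_ocorenface results l → Spec_contar_ocorenface results l (contar_ocorenface results l)

-- ===== LEMMAS AND PROOFS =====

lemma foldA_eq (results : List Int) (f1 f2 f3 f4 f5 f6 : Int) :
    results.foldl
      (fun (st : Int × Int × Int × Int × Int × Int) (resultado : Int) =>
        let (g1, g2, g3, g4, g5, g6) := st
        if resultado = 1 then (g1 + 1, g2, g3, g4, g5, g6)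
        else if resultado = 2 then (g1, g2 + 1, g3, g4, g5, g6)
        else if resultado = 3 then (g1, g2, g3 + 1, g4, g5, g6)
        else if resultado = 4 then (g1, g2, g3, g4 + 1, g5, g6)
        else if resultado = 5 then (g1, g2, g3, g4, g5 + 1, g6)
        else (g1, g2, g3, g4, g5, g6 + 1))
      (f1, f2, f3, f4, f5, f6)
    = (f1 + results.count 1, f2 + results.count 2, f3 + results.count 3,
       f4 + results.count 4, f5 + results.count 5,
       f6 + ((results.length : Int) - (results.count 1 + results.count 2 + results.count 3
              + results.count 4 + results.count 5))) := by
  induction results generalizing f1 f2 f3 f4 f5 f6 with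
  | nil => simp
  | cons x xs ih =>
      simp only [List.foldl_cons]
      split_ifs with h1 h2 h3 h4 h5 <;>
        rw [ih] <;>
        simp_all only [List.count_cons, List.length_cons, Prod.mk.injEq, beq_iff_eq,
          beq_self_eq_true, if_true] <;>
        norm_num <;> omega

-- ===== VERDICT =====
theorem contar_ocorenface_spec : Claim_equal_contar_ocorenface := by
  intro results l _
  unfold Spec_contar_ocorenface contar_ocorenface contar_ocorenface_alt
  have hr : PySem.List.pyRange 1 6 1 = [1, 2, 3, 4, 5] := by decide
  rw [hr, foldA_eq]
  simp [PySem.List.count_eq, PySem.List.enumerate, PySem.Str.join]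
  apply String.toList_inj.mp
  have t1 : PySem.Int.toChars 1 = ['1'] := by decide
  have t2 : PySem.Int.toChars 2 = ['2'] := by decide
  have t3 : PySem.Int.toChars 3 = ['3'] := by decide
  have t4 : PySem.Int.toChars 4 = ['4'] := by decide
  have t5 : PySem.Int.toChars 5 = ['5'] := by decide
  have t6 : PySem.Int.toChars 6 = ['6'] := by decide
  simp [PySem.Chars.join_cons_cons, PySem.Chars.join_singleton,
        PySem.Int.toList_toStr, t1, t2, t3, t4, t5, t6, List.append_assoc]
  ring_nf
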